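-- pv_equiv track=rewrite | github.com/grahampicard/advent-of-code-2022 | 3/3.py | second_priority
-- ===== SOURCE A (Python) =====
-- import string
--
-- def find_second_shared(rucksack: list[str]) -> list[str]:
--     any_match = {}
--     for sack in rucksack:
--         for letter in set(sack):
--             if letter not in any_match:
--                 any_match[letter] = 1
--             else:
--                 any_match[letter] += 1
--     full_match = []
--     for k, v in any_match.items():
--         if v >= len(rucksack):
--             full_match.append(k)
--     return full_match
--
-- def second_priority(text: str) -> int:
--     all_lines = text.split("\n")
--     lookup = {a: i + 1 for i, a in enumerate(string.ascii_letters)}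
--     buffer = []
--     matches = []
--     for line in all_lines:
--         buffer.append(line)
--         if len(buffer) == 3:
--             matches.extend(find_second_shared(buffer))
--             buffer = []
--     priority = 0
--     for m in matches:
--         priority += lookup[m]
--     return priority
-- ===== SOURCE B (Python) =====
-- import string
--
-- def second_priority(text: str) -> int:
--     lines = text.split("\n")
--     lookup = {a: i + 1 for i, a in enumerate(string.ascii_letters)}
--     total = 0
--     while len(lines) >= 3:
--         common = set(lines[0]) & set(lines[1]) & set(lines[2])
--         total += sum(lookup[c] for c in common)
--         lines = lines[3:]
--     return total
-- ===== Notes on version B (the rewrite author's own statement) =====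
-- stated objective: simpler
-- what changed: B consumes the line list three at a time (while len>=3, slice off the triple) and sums priorities of the per-triple set intersection, instead of A's buffer list plus a per-letter counting dict thresholded against the group size.
import Mathlib
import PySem

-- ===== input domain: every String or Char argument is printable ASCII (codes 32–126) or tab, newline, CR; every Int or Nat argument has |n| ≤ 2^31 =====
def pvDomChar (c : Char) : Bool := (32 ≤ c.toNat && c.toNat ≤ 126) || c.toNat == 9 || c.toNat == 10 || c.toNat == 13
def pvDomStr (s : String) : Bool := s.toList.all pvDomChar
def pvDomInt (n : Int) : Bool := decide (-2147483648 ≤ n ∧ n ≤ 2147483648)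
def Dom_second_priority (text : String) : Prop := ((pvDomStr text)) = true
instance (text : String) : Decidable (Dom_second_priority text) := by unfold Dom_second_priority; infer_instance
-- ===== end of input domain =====

-- B replaces A's 3-line buffer plus per-letter counting dict with consuming the line list
-- three at a time and summing priorities of each triple's set intersection (objective: simpler).

-- string.ascii_letters
def pvAsciiLetters : List Char := "abcdefghijklmnopqrstuvwxyzABCDEFGHIJKLMNOPQRSTUVWXYZ".toList

-- lookup = {a: i + 1 for i, a in enumerate(string.ascii_letters)} — this identical line occurs in both A and B
def pvLookup : PySem.Dict Char Int :=
  (PySem.List.enumerate pvAsciiLetters).foldl (fun d p => d.insert p.2 (p.1 + 1)) PySem.Dict.empty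

-- ===== PORT A =====
def find_second_shared (rucksack : List String) : List Char :=
  let any_match := rucksack.foldl
    (fun d sack => (PySem.Set.ofList sack.toList).foldl
      (fun d letter => if d.contains letter = false then d.insert letter 1
        else d.insert letter (d.getD letter 0 + 1)) d)
    PySem.Dict.empty
  -- iterating set(sack) visits its distinct letters; the fold's RESULT is consumed only through
  -- sums/memberships below, so the ofList visiting order is exact for the returned priority
  any_match.items.foldl
    (fun acc kv => if kv.2 ≥ (rucksack.length : Int) then acc ++ [kv.1] else acc) []

def second_priority (text : String) : Int :=
  -- text.split("\n"): sep ≠ "" so split? is always some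
  let all_lines := (PySem.Str.split? text "\n").getD []
  let st := all_lines.foldl
    (fun (st : List String × List Char) line =>
      let buffer := st.1 ++ [line]
      if buffer.length = 3 then ([], st.2 ++ find_second_shared buffer) else (buffer, st.2))
    ([], [])
  -- lookup[m] raises KeyError on a non-letter; those inputs are excluded by Pre_, where getD is exact
  st.2.foldl (fun p m => p + pvLookup.getD m 0) 0

-- ===== PORT B =====
-- while len(lines) >= 3: consume lines[0..2], lines = lines[3:]
def second_priority_alt_go (total : Int) : List String → Int
  | a :: b :: c :: rest =>
      second_priority_alt_go
        (total + (((PySem.Set.ofList a.toList).inter (PySem.Set.ofList b.toList)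
                    |>.inter (PySem.Set.ofList c.toList)).map
                  (fun ch => pvLookup.getD ch 0)).sum)   -- sum(lookup[c] for c in common); KeyError excluded by Pre_
        rest
  | _ => total

def second_priority_alt (text : String) : Int :=
  second_priority_alt_go 0 ((PySem.Str.split? text "\n").getD [])

-- ===== PRECONDITION & SPEC =====
-- Pre_ excludes exactly the inputs on which Python A raises KeyError: some character shared by
-- all three lines of a complete group of three is not an ASCII letter (it is then missing from lookup).
def Pre_second_priority (text : String) : Prop :=
  let lines := (PySem.Str.split? text "\n").getD []
  ((List.range (lines.length / 3)).all (fun i =>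
    (lines.getD (3 * i) "").toList.all (fun ch =>
      !((lines.getD (3 * i + 1) "").toList.contains ch) ||
      !((lines.getD (3 * i + 2) "").toList.contains ch) ||
      ch.isAlpha))) = true
instance (text : String) : Decidable (Pre_second_priority text) := by unfold Pre_second_priority; infer_instance

def pvWitness_second_priority : String := "ab\nca\nad"

def Spec_second_priority (text : String) (out : Int) : Prop := out = second_priority_alt text
instance (text : String) (out : Int) : Decidable (Spec_second_priority text out) := by unfold Spec_second_priority; infer_instance

-- ===== CLAIM (what is proved, stated in full; the proofs are below) =====
def Claim_equal_second_priority : Prop := ∀ (text : String), Dom_second_priority text → Pre_second_priority text → Spec_second_priority text (second_priority text)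

-- ===== LEMMAS AND PROOFS =====

-- the accumulator of A's full_match fold: a filtered projection
theorem pv_foldl_filter_fst (l : List (Char × Int)) (acc : List Char) (n : Int) :
    l.foldl (fun acc kv => if kv.2 ≥ n then acc ++ [kv.1] else acc) acc
      = acc ++ (l.filter (fun kv => kv.2 ≥ n)).map (·.1) := by
  induction l generalizing acc with
  | nil => simp
  | cons x xs ih =>
    by_cases h : x.2 ≥ n <;> simp [List.foldl_cons, h, ih]

-- A's counting step is the insert-getD-add-one step
theorem pv_step_eq :
    (fun (d : PySem.Dict Char Int) letter => if d.contains letter = false then d.insert letter 1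
        else d.insert letter (d.getD letter 0 + 1))
      = fun d x => d.insert x (d.getD x 0 + 1) := by
  funext d x
  by_cases h : d.contains x = false
  · rw [PySem.Dict.getD_of_not_contains d 0 h]; simp [h]
  · simp [h]

-- per-group: A's full_match is a permutation of B's triple intersection
theorem pv_fss_perm (a b c : String) :
    (find_second_shared [a, b, c]).Perm
      (((PySem.Set.ofList a.toList).inter (PySem.Set.ofList b.toList)).inter
        (PySem.Set.ofList c.toList)) := by
  set sa := PySem.Set.ofList a.toList with hsa
  set sb := PySem.Set.ofList b.toList with hsb
  set sc := PySem.Set.ofList c.toList with hsc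
  set L : List Char := sa ++ sb ++ sc with hL
  have hform : find_second_shared [a, b, c]
      = List.map (·.1) (((PySem.Set.ofList L).map (fun k => (k, (L.count k : Int)))).filter
          (fun kv : Char × Int => kv.2 ≥ (3 : Int))) := by
    simp only [find_second_shared, pv_step_eq, List.foldl_cons, List.foldl_nil]
    rw [← List.foldl_append, ← List.foldl_append,
      PySem.Dict.foldl_insert_getD_add_one_eq_counter, pv_foldl_filter_fst,
      PySem.Dict.items_counter]
    norm_num [hL, hsa, hsb, hsc]
  have hform2 : find_second_shared [a, b, c]
      = (PySem.Set.ofList L).filter (fun k => decide ((3 : Int) ≤ (L.count k : Int))) := by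
    rw [hform, List.filter_map, List.map_map]
    simp [Function.comp_def, ge_iff_le]
  have hcnt : ∀ x : Char, ((3 : Int) ≤ (L.count x : Int)) ↔ (x ∈ sa ∧ x ∈ sb ∧ x ∈ sc) := by
    intro x
    have h1 := (List.nodup_iff_count_le_one.mp (hsa ▸ PySem.Set.nodup_ofList a.toList)) x
    have h2 := (List.nodup_iff_count_le_one.mp (hsb ▸ PySem.Set.nodup_ofList b.toList)) x
    have h3 := (List.nodup_iff_count_le_one.mp (hsc ▸ PySem.Set.nodup_ofList c.toList)) x
    rw [hL]
    simp only [List.count_append]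
    rw [← List.count_pos_iff (a := x) (l := sa), ← List.count_pos_iff (a := x) (l := sb),
      ← List.count_pos_iff (a := x) (l := sc)]
    push_cast
    omega
  have hnodup : (find_second_shared [a, b, c]).Nodup := by
    rw [hform2]; exact (PySem.Set.nodup_ofList L).filter _
  have hnodupI : ((sa.inter sb).inter sc).Nodup :=
    PySem.Set.nodup_inter _ _ (PySem.Set.nodup_inter _ _ (hsa ▸ PySem.Set.nodup_ofList a.toList))
  refine (List.perm_ext_iff_of_nodup hnodup hnodupI).mpr ?_
  intro x
  rw [hform2, PySem.Set.mem_inter, PySem.Set.mem_inter, List.mem_filter,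
    PySem.Set.mem_ofList, decide_eq_true_eq, hcnt x]
  constructor
  · rintro ⟨-, h⟩; exact ⟨⟨h.1, h.2.1⟩, h.2.2⟩
  · rintro ⟨⟨h1', h2'⟩, h3'⟩
    exact ⟨by rw [hL]; simp [List.mem_append]; tauto, h1', h2', h3'⟩

-- per-group: equal priority sums
theorem pv_chunk_sum (a b c : String) :
    ((find_second_shared [a, b, c]).map (fun ch => pvLookup.getD ch 0)).sum
      = ((((PySem.Set.ofList a.toList).inter (PySem.Set.ofList b.toList)).inter
          (PySem.Set.ofList c.toList)).map (fun ch => pvLookup.getD ch 0)).sum :=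
  ((pv_fss_perm a b c).map _).sum_eq

theorem pv_go_acc : ∀ (ls : List String) (t : Int),
    second_priority_alt_go t ls = t + second_priority_alt_go 0 ls := by
  intro ls
  induction hn : ls.length using Nat.strong_induction_on generalizing ls with
  | _ n ih =>
    match ls with
    | a :: b :: c :: rest =>
      intro t
      have hr : rest.length < n := by subst hn; simp; omega
      simp only [second_priority_alt_go]
      rw [ih rest.length hr rest rfl, ih rest.length hr rest rfl (0 + _)]
      ring
    | [] => intro t; simp [second_priority_alt_go]
    | [x] => intro t; simp [second_priority_alt_go]
    | [x, y] => intro t; simp [second_priority_alt_go]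

-- A's buffered fold, started with an empty buffer, accumulates exactly B's group sums
theorem pv_loop_main : ∀ (ls : List String) (m : List Char),
    (((ls.foldl
        (fun (st : List String × List Char) line =>
          let buffer := st.1 ++ [line]
          if buffer.length = 3 then ([], st.2 ++ find_second_shared buffer) else (buffer, st.2))
        ([], m)).2).map (fun ch => pvLookup.getD ch 0)).sum
      = ((m.map (fun ch => pvLookup.getD ch 0)).sum) + second_priority_alt_go 0 ls := by
  intro ls
  induction hn : ls.length using Nat.strong_induction_on generalizing ls with
  | _ n ih =>
    match ls with
    | a :: b :: c :: rest =>
      intro m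
      have hr : rest.length < n := by subst hn; simp; omega
      have hih := ih rest.length hr rest rfl (m ++ find_second_shared [a, b, c])
      rw [List.foldl_cons, List.foldl_cons, List.foldl_cons]
      refine (hih.trans ?_)
      simp only [List.map_append, List.sum_append, second_priority_alt_go]
      rw [pv_go_acc, pv_chunk_sum]
      conv_rhs => rw [pv_go_acc rest]
      ring
    | [] => intro m; simp [second_priority_alt_go]
    | [x] => intro m; simp [second_priority_alt_go]
    | [x, y] => intro m; simp [second_priority_alt_go]

-- ===== VERDICT (by name: the statement is the Claim_ definition above) =====
theorem second_priority_spec : Claim_equal_second_priority := by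
  intro text _ _
  show second_priority text = second_priority_alt text
  rw [second_priority, second_priority_alt]
  rw [PySem.List.foldl_add]
  simpa using pv_loop_main ((PySem.Str.split? text "\n").getD []) []
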